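-- pv_equiv track=rewrite | github.com/jimmybeckett/AdventOfCode2022 | aoc/2022/16.py | pressure
-- ===== SOURCE A (Python) =====
-- def pressure(start, sequence, flow_rates, minutes, dists):
--     prev = start
--     total_pressure = 0
--     for valve in sequence:
--         minutes -= dists[prev][valve] + 1
--         total_pressure += minutes * flow_rates[valve]
--         prev = valve
--     return total_pressure
-- ===== SOURCE B (Python) =====
-- def pressure(start, sequence, flow_rates, minutes, dists):
--     # per-step travel+open costs, paired (prev, valve) via zip
--     costs = [dists[p][v] + 1 for p, v in zip([start] + list(sequence), sequence)]
--     # prefix sums: cumulative elapsed time when each valve is opened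
--     elapsed = []
--     t = 0
--     for c in costs:
--         t += c
--         elapsed.append(t)
--     # weighted sum of remaining minutes times flow rate
--     return sum((minutes - t) * flow_rates[v] for v, t in zip(sequence, elapsed))
-- ===== Notes on version B (the rewrite author's own statement) =====
-- stated objective: alternative
-- what changed: Replaces A's single fused loop carrying (prev, minutes, total) state by three stateless passes: a zipped per-step cost list, a prefix-sum pass for cumulative elapsed times, and a weighted-sum comprehension.
import Mathlib
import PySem

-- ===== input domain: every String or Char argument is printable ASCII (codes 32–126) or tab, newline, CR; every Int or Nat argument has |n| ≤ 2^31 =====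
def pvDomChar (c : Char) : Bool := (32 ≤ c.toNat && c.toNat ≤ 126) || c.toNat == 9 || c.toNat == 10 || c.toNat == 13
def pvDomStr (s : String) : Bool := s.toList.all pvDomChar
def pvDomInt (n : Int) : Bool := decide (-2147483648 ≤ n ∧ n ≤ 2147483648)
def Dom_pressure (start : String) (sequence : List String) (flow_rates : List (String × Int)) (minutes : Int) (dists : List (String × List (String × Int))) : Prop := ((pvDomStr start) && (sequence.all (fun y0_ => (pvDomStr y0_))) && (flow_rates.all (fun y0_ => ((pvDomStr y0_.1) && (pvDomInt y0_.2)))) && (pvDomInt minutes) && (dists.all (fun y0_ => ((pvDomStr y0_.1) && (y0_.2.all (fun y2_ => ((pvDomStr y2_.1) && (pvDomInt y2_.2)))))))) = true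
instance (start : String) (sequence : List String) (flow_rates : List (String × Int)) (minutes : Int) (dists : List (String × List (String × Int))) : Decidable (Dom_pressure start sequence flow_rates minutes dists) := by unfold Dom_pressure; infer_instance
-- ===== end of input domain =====

-- B replaces A's fused stateful loop by three stateless passes (cost list, prefix sums, weighted sum); same O(n) cost.
-- Pre_ excludes inputs where A raises KeyError (a missing dists/flow_rates key along the walk).


-- ===== PORT A =====
-- A's loop: state (prev, minutes, total_pressure) threaded through the sequence.
def pressureLoopA (dists : List (String × List (String × Int))) (flow_rates : List (String × Int)) : List String → String → Int → Int → Int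
  | [], _, _, total => total
  | valve :: rest, prev, minutes, total =>
    let minutes' := minutes - ((PySem.Dict.mk ((PySem.Dict.mk dists).getD prev [])).getD valve 0 + 1)
    pressureLoopA dists flow_rates rest valve minutes' (total + minutes' * (PySem.Dict.mk flow_rates).getD valve 0)

def pressure (start : String) (sequence : List String) (flow_rates : List (String × Int)) (minutes : Int) (dists : List (String × List (String × Int))) : Int :=
  pressureLoopA dists flow_rates sequence start minutes 0

-- ===== PORT B =====
-- costs = [dists[p][v] + 1 for p, v in zip([start] + sequence, sequence)]
def costsB (dists : List (String × List (String × Int))) (start : String) (sequence : List String) : List Int :=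
  ((start :: sequence).zip sequence).map
    (fun pv => (PySem.Dict.mk ((PySem.Dict.mk dists).getD pv.1 [])).getD pv.2 0 + 1)

-- prefix sums of the costs, accumulator t starting at 0
def prefixB : List Int → Int → List Int
  | [], _ => []
  | c :: rest, t => (t + c) :: prefixB rest (t + c)

def pressure_alt (start : String) (sequence : List String) (flow_rates : List (String × Int)) (minutes : Int) (dists : List (String × List (String × Int))) : Int :=
  ((sequence.zip (prefixB (costsB dists start sequence) 0)).map
    (fun vt => (minutes - vt.2) * (PySem.Dict.mk flow_rates).getD vt.1 0)).sum

-- ===== PRECONDITION & SPEC =====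
-- Pre_ : every (prev, valve) pair of the walk has its dists[prev][valve] entry and every valve a flow rate
-- (exactly where Python A returns without a KeyError).
def Pre_pressure (start : String) (sequence : List String) (flow_rates : List (String × Int)) (minutes : Int) (dists : List (String × List (String × Int))) : Prop :=
  ∀ pv ∈ (start :: sequence).zip sequence,
    (((PySem.Dict.mk dists).get? pv.1).bind (fun row => (PySem.Dict.mk row).get? pv.2)).isSome = true ∧
    ((PySem.Dict.mk flow_rates).get? pv.2).isSome = true
instance (start : String) (sequence : List String) (flow_rates : List (String × Int)) (minutes : Int) (dists : List (String × List (String × Int))) : Decidable (Pre_pressure start sequence flow_rates minutes dists) := by unfold Pre_pressure; infer_instance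

def pvWitness_pressure : String × List String × (List (String × Int)) × Int × (List (String × List (String × Int))) :=
  ("AA", ["BB"], [("BB", 3)], 10, [("AA", [("BB", 2)])])

def Spec_pressure (start : String) (sequence : List String) (flow_rates : List (String × Int)) (minutes : Int) (dists : List (String × List (String × Int))) (out : Int) : Prop := out = pressure_alt start sequence flow_rates minutes dists
instance (start : String) (sequence : List String) (flow_rates : List (String × Int)) (minutes : Int) (dists : List (String × List (String × Int))) (out : Int) : Decidable (Spec_pressure start sequence flow_rates minutes dists out) := by unfold Spec_pressure; infer_instance

-- ===== CLAIM (what is proved, stated in full; the proofs are below) =====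
def Claim_equal_pressure : Prop := ∀ (start : String) (sequence : List String) (flow_rates : List (String × Int)) (minutes : Int) (dists : List (String × List (String × Int))), Dom_pressure start sequence flow_rates minutes dists → Pre_pressure start sequence flow_rates minutes dists → Spec_pressure start sequence flow_rates minutes dists (pressure start sequence flow_rates minutes dists)

-- ===== LEMMAS AND PROOFS =====

-- shifting the accumulator of prefixB shifts every entry
theorem prefixB_shift (cs : List Int) (a b : Int) :
    prefixB cs (a + b) = (prefixB cs b).map (fun x => a + x) := by
  induction cs generalizing b with
  | nil => simp [prefixB]
  | cons c rest ih =>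
    simp only [prefixB, List.map_cons]
    rw [show a + b + c = a + (b + c) by ring, ih (b + c)]

-- the loop of A equals total + B's weighted sum (over any prev/minutes/total)
theorem loopA_eq (dists : List (String × List (String × Int))) (flow_rates : List (String × Int)) :
    ∀ (seq : List String) (prev : String) (minutes total : Int),
    pressureLoopA dists flow_rates seq prev minutes total =
      total + ((seq.zip (prefixB (costsB dists prev seq) 0)).map
        (fun vt => (minutes - vt.2) * (PySem.Dict.mk flow_rates).getD vt.1 0)).sum := by
  intro seq
  induction seq with
  | nil => intro prev minutes total; simp [pressureLoopA, costsB, prefixB]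
  | cons v rest ih =>
    intro prev minutes total
    rw [pressureLoopA, ih]
    set c : Int := (PySem.Dict.mk ((PySem.Dict.mk dists).getD prev [])).getD v 0 + 1 with hcdef
    have hc : costsB dists prev (v :: rest) = c :: costsB dists v rest := by
      rw [hcdef]; simp [costsB]
    rw [hc]
    simp only [prefixB, List.zip_cons_cons, List.map_cons, List.sum_cons]
    rw [show (0 : Int) + c = c + 0 by ring]
    rw [prefixB_shift (costsB dists v rest) c 0, List.zip_map_right, List.map_map]
    have hmap : ∀ vt : String × Int,
        ((fun vt : String × Int => (minutes - vt.2) * (PySem.Dict.mk flow_rates).getD vt.1 0) ∘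
          (Prod.map id (fun x => c + x))) vt
        = (fun vt : String × Int => (minutes - c - vt.2) * (PySem.Dict.mk flow_rates).getD vt.1 0) vt := by
      intro vt; obtain ⟨a, b⟩ := vt; simp only [Function.comp_apply, Prod.map, id_eq]; ring
    rw [List.map_congr_left (fun vt _ => hmap vt)]
    ring

-- ===== VERDICT (by name: the statement is the Claim_ definition above) =====
theorem pressure_spec : Claim_equal_pressure := by
  intro start sequence flow_rates minutes dists _ _
  unfold Spec_pressure pressure pressure_alt
  rw [loopA_eq]
  ring
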